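-- pv_equiv track=rewrite | github.com/bonzanni/casa-ha-app | casa-agent/rootfs/opt/casa/channels/voice/prosodic.py | _rightmost_clause_mark
-- ===== SOURCE A (Python) =====
-- _CLAUSE_MARKS = ",;"
--
-- _OPEN = {"[": "]", "(": ")", "{": "}", "<": ">"}
--
-- def _rightmost_clause_mark(s: str) -> int | None:
--     """Return index AFTER rightmost clause mark outside any bracket, or None."""
--     depth = 0
--     open_stack: list[str] = []
--     last: int | None = None
--     i = 0
--     while i < len(s):
--         c = s[i]
--         if c in _OPEN:
--             open_stack.append(_OPEN[c])
--             depth += 1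
--         elif open_stack and c == open_stack[-1]:
--             open_stack.pop()
--             depth -= 1
--         elif depth == 0 and c in _CLAUSE_MARKS:
--             last = i + 1
--         i += 1
--     return last
-- ===== SOURCE B (Python) =====
-- _CLAUSE_MARKS = ",;"
--
-- _OPEN = {"[": "]", "(": ")", "{": "}", "<": ">"}
--
-- def _rightmost_clause_mark(s: str) -> int | None:
--     """Return index AFTER rightmost clause mark outside any bracket, or None."""
--     stack: list[str] = []
--     depth: list[int] = []
--     for c in s:
--         depth.append(len(stack))
--         if c in _OPEN:
--             stack.append(_OPEN[c])
--         elif stack and c == stack[-1]: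
--             stack.pop()
--     for i, (c, d) in reversed(list(enumerate(zip(s, depth)))):
--         if d == 0 and c in _CLAUSE_MARKS:
--             return i + 1
--     return None
-- ===== Notes on version B (the rewrite author's own statement) =====
-- stated objective: alternative
-- what changed: Replaces A's single forward pass carrying a last-match accumulator by two passes: a first pass records the bracket depth at every index, then a reversed scan returns i+1 at the first (rightmost) clause mark found at depth 0, so the answer comes from an early-exit backward search instead of a maintained accumulator.
import Mathlib
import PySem

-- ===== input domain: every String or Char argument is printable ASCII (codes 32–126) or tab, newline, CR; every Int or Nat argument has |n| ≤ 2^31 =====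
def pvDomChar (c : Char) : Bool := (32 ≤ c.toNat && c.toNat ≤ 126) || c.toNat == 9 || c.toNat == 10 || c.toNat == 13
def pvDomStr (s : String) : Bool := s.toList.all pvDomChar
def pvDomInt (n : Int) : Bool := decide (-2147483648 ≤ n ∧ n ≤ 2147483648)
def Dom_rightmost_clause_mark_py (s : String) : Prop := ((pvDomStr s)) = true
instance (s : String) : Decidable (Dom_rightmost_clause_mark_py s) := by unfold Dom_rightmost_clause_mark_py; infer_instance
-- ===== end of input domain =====

-- B replaces A's forward pass with last-match accumulator by a depth table + reversed early-exit scan (alternative decomposition, same cost).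


-- ===== PORT A =====
-- _OPEN[c] for an open bracket c
def pvOpenGet (c : Char) : Char :=
  if c = '[' then ']' else if c = '(' then ')' else if c = '{' then '}' else '>'

-- one iteration of A's while loop; state = (depth, open_stack, last, i);
-- Python's append/pop at the list END are rendered as cons/tail at the HEAD
def pvAStep (st : Int × List Char × Option Int × Int) (c : Char) :
    Int × List Char × Option Int × Int :=
  let (depth, stack, last, i) := st
  if c = '[' ∨ c = '(' ∨ c = '{' ∨ c = '<' then
    (depth + 1, pvOpenGet c :: stack, last, i + 1)
  else if stack ≠ [] ∧ c = stack.headD ' ' then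
    (depth - 1, stack.tail, last, i + 1)
  else if depth = 0 ∧ (c = ',' ∨ c = ';') then
    (depth, stack, some (i + 1), i + 1)
  else
    (depth, stack, last, i + 1)

def rightmost_clause_mark_py (s : String) : Option Int :=
  (s.toList.foldl pvAStep (0, [], none, 0)).2.2.1

-- ===== PORT B =====
-- first pass: depth[i] = len(stack) before processing s[i], with A's exact stack logic
def pvDepthList : List Char → List Char → List Nat
  | [], _ => []
  | c :: cs, stack =>
    stack.length ::
      (if c = '[' ∨ c = '(' ∨ c = '{' ∨ c = '<' then
        pvDepthList cs (pvOpenGet c :: stack)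
      else if stack ≠ [] ∧ c = stack.headD ' ' then
        pvDepthList cs stack.tail
      else
        pvDepthList cs stack)

-- second pass: first hit in the reversed enumerated (char, depth) list, early exit
def pvFindRev : List (Nat × Char × Nat) → Option Int
  | [] => none
  | (i, c, d) :: rest =>
    if d = 0 ∧ (c = ',' ∨ c = ';') then some ((i : Int) + 1) else pvFindRev rest

def rightmost_clause_mark_py_alt (s : String) : Option Int :=
  pvFindRev ((List.zip (List.range s.toList.length)
      (List.zip s.toList (pvDepthList s.toList []))).reverse)

-- ===== PRECONDITION & SPEC =====
def Spec_rightmost_clause_mark_py (s : String) (out : Option Int) : Prop := out = rightmost_clause_mark_py_alt s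
instance (s : String) (out : Option Int) : Decidable (Spec_rightmost_clause_mark_py s out) := by unfold Spec_rightmost_clause_mark_py; infer_instance

-- ===== CLAIM (what is proved, stated in full; the proofs are below) =====
def Claim_equal_rightmost_clause_mark_py : Prop := ∀ (s : String), Dom_rightmost_clause_mark_py s → Spec_rightmost_clause_mark_py s (rightmost_clause_mark_py s)

-- ===== LEMMAS AND PROOFS =====

-- annotated triples (index, char, depth-before) along A's stack evolution, indices from n
def pvTrip (n : Nat) : List Char → List Char → List (Nat × Char × Nat)
  | [], _ => []
  | c :: cs, stack =>
    (n, c, stack.length) ::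
      (if c = '[' ∨ c = '(' ∨ c = '{' ∨ c = '<' then
        pvTrip (n + 1) cs (pvOpenGet c :: stack)
      else if stack ≠ [] ∧ c = stack.headD ' ' then
        pvTrip (n + 1) cs stack.tail
      else
        pvTrip (n + 1) cs stack)

theorem pvFindRev_append (l₁ l₂ : List (Nat × Char × Nat)) :
    pvFindRev (l₁ ++ l₂) =
      match pvFindRev l₁ with
      | some v => some v
      | none => pvFindRev l₂ := by
  induction l₁ with
  | nil => simp [pvFindRev]
  | cons x xs ih =>
    obtain ⟨i, c, d⟩ := x
    simp only [List.cons_append, pvFindRev]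
    split_ifs <;> simp [ih]

theorem pvTrip_eq_zip (cs : List Char) : ∀ (n : Nat) (stack : List Char),
    pvTrip n cs stack =
      List.zip (List.range' n cs.length) (List.zip cs (pvDepthList cs stack)) := by
  induction cs with
  | nil => intro n stack; simp [pvTrip, pvDepthList]
  | cons c cs ih =>
    intro n stack
    simp only [pvTrip, pvDepthList, List.length_cons, List.range'_succ, List.zip_cons_cons]
    split_ifs <;> simp [ih]

theorem pvFoldA (cs : List Char) : ∀ (stack : List Char) (last : Option Int) (n : Nat),
    (cs.foldl pvAStep ((stack.length : Int), stack, last, (n : Int))).2.2.1 =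
      match pvFindRev ((pvTrip n cs stack).reverse) with
      | some v => some v
      | none => last := by
  induction cs with
  | nil => intro stack last n; simp [pvTrip, pvFindRev]
  | cons c cs ih =>
    intro stack last n
    have h2 : ((n : Int) + 1) = (((n + 1 : Nat)) : Int) := by push_cast; ring
    simp only [List.foldl_cons, pvAStep, pvTrip, List.reverse_cons, pvFindRev_append]
    by_cases hop : c = '[' ∨ c = '(' ∨ c = '{' ∨ c = '<'
    · rw [if_pos hop, if_pos hop]
      have h1 : (stack.length : Int) + 1 = (((pvOpenGet c :: stack).length : Nat) : Int) := by
        push_cast [List.length_cons]; ring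
      rw [h1, h2, ih]
      have hnm : ¬ (c = ',' ∨ c = ';') := by
        rcases hop with h | h | h | h <;> subst h <;> decide
      cases pvFindRev ((pvTrip (n + 1) cs (pvOpenGet c :: stack)).reverse) <;>
        simp [pvFindRev, hnm]
    · rw [if_neg hop, if_neg hop]
      by_cases hpop : stack ≠ [] ∧ c = stack.headD ' '
      · rw [if_pos hpop, if_pos hpop]
        cases stack with
        | nil => exact absurd rfl hpop.1
        | cons a l =>
          have h1 : (((a :: l).length : Nat) : Int) - 1 = ((l.length : Nat) : Int) := by
            push_cast [List.length_cons]; ring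
          rw [List.tail_cons, h1, h2, ih]
          cases pvFindRev ((pvTrip (n + 1) cs l).reverse) <;> simp [pvFindRev]
      · rw [if_neg hpop]
        by_cases hmk : (stack.length : Int) = 0 ∧ (c = ',' ∨ c = ';')
        · have hsnil : stack = [] := by
            cases stack with
            | nil => rfl
            | cons a l =>
              exfalso
              have h := hmk.1
              rw [List.length_cons] at h
              push_cast at h
              omega
          subst hsnil
          rw [if_pos hmk, if_neg hpop]
          rw [h2, ih]
          cases pvFindRev ((pvTrip (n + 1) cs []).reverse) <;> simp [pvFindRev, hmk.2]
        · rw [if_neg hmk, if_neg hpop]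
          have hmkN : ¬ (stack.length = 0 ∧ (c = ',' ∨ c = ';')) := by
            intro ⟨ha, hb⟩
            exact hmk ⟨by exact_mod_cast ha, hb⟩
          rw [h2, ih]
          have hmkN' : ¬ (stack = [] ∧ (c = ',' ∨ c = ';')) := by
            intro ⟨ha, hb⟩
            exact hmkN ⟨by simp [ha], hb⟩
          cases pvFindRev ((pvTrip (n + 1) cs stack).reverse) <;>
            simp [pvFindRev, hmkN']

-- ===== VERDICT (by name: the statement is the Claim_ definition above) =====
theorem rightmost_clause_mark_py_spec : Claim_equal_rightmost_clause_mark_py := by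
  intro s _
  unfold Spec_rightmost_clause_mark_py rightmost_clause_mark_py rightmost_clause_mark_py_alt
  have h := pvFoldA s.toList [] none 0
  simp only [List.length_nil, Nat.cast_zero] at h
  rw [h, pvTrip_eq_zip, List.range_eq_range']
  cases pvFindRev ((List.zip (List.range' 0 s.toList.length)
      (List.zip s.toList (pvDepthList s.toList []))).reverse) <;> simp
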